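-- pv_equiv track=rewrite | github.com/hhhadis/researcher_agent | core_concept_tree_2/predict_new_issues.py | get_linked_nodes
-- ===== SOURCE A (Python) =====
-- def get_linked_nodes(source_node, source_pid_map, target_pid_map):
--     """
--     Finds nodes in the target set that share papers with the source_node.
--     Returns list of (target_node, overlap_count) sorted by count.
--     """
--     if source_node not in source_pid_map:
--         return []
--
--     source_pids = source_pid_map[source_node]
--     links = []
--
--     for target_node, target_pids in target_pid_map.items():
--         overlap = len(source_pids.intersection(target_pids))
--         if overlap > 0:
--             links.append((target_node, overlap))
--
--     # Sort by overlap count desc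
--     links.sort(key=lambda x: x[1], reverse=True)
--     return [x[0] for x in links]
-- ===== SOURCE B (Python) =====
-- def get_linked_nodes(source_node, source_pid_map, target_pid_map):
--     if source_node not in source_pid_map:
--         return []
--     source_pids = source_pid_map[source_node]
--     # inverted index: pid -> list of target nodes whose pid-set contains it
--     pairs = [(pid, target_node)
--              for target_node, target_pids in target_pid_map.items()
--              for pid in target_pids]
--     index = {}
--     for pid, node in pairs:
--         index[pid] = index.get(pid, []) + [node]
--     counts = {}
--     for pid in source_pids:
--         for node in index.get(pid, []):
--             counts[node] = counts.get(node, 0) + 1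
--     links = [(node, counts.get(node, 0)) for node in target_pid_map
--              if counts.get(node, 0) > 0]
--     links.sort(key=lambda x: x[1], reverse=True)
--     return [x[0] for x in links]
-- ===== Notes on version B (the rewrite author's own statement) =====
-- stated objective: alternative
-- what changed: B replaces A's per-target set-intersection loop by an inverted index (pid -> target nodes) plus a counter accumulated over the source pids, then rebuilds the pre-sort list from the target map order and applies the same stable sort; Pre_ only excludes association lists that cannot encode A's dict[str, set[str]] arguments (duplicate target keys or duplicate pids in a target's pid list).
import Mathlib
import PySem

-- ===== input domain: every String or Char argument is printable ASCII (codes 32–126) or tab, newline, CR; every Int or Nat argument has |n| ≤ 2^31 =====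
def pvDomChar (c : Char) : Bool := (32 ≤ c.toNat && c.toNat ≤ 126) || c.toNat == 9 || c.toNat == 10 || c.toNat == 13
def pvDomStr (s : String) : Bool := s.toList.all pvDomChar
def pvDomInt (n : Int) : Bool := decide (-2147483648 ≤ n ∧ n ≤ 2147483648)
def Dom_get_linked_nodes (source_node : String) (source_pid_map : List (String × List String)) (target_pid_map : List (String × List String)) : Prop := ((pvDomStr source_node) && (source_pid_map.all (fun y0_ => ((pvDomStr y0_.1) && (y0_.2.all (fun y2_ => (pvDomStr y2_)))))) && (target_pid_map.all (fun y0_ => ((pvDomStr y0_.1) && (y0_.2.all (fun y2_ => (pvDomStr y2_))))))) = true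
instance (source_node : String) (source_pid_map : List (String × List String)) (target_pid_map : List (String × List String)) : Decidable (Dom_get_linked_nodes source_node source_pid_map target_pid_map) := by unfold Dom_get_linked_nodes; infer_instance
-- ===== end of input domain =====

-- B replaces A's per-target set intersections with an inverted index pid → target nodes and a
-- counter accumulated over the source pids (same pre-sort order, same stable sort); objective: alternative.

-- ===== PORT A =====
def get_linked_nodes (source_node : String) (source_pid_map : List (String × List String)) (target_pid_map : List (String × List String)) : List String :=
  match (PySem.Dict.mk source_pid_map).get? source_node with
  | none => []                                         -- 'if source_node not in source_pid_map: return []'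
  | some source_pids =>
    let links : List (String × Int) := target_pid_map.foldl (fun links p =>
        let overlap : Int := ((PySem.Set.inter source_pids p.2).length : Int)
        if overlap > 0 then links ++ [(p.1, overlap)] else links) []
    (PySem.List.sorted links (fun x => x.2) true).map (fun x => x.1)

-- ===== PORT B =====
def get_linked_nodes_alt (source_node : String) (source_pid_map : List (String × List String)) (target_pid_map : List (String × List String)) : List String :=
  match (PySem.Dict.mk source_pid_map).get? source_node with
  | none => []
  | some source_pids =>
    let pairs : List (String × String) := target_pid_map.flatMap (fun p => p.2.map (fun pid => (pid, p.1)))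
    let index : PySem.Dict String (List String) :=
      pairs.foldl (fun d q => d.modify q.1 [] (fun l => l ++ [q.2])) PySem.Dict.empty
    let counts : PySem.Dict String Int :=
      source_pids.foldl (fun d pid =>
        (index.getD pid []).foldl (fun d node => d.insert node (d.getD node 0 + 1)) d)
        PySem.Dict.empty
    let links : List (String × Int) :=
      ((PySem.Dict.mk target_pid_map).keys).foldl (fun acc node =>
        if counts.getD node 0 > 0 then acc ++ [(node, counts.getD node 0)] else acc) []
    (PySem.List.sorted links (fun x => x.2) true).map (fun x => x.1)

-- ===== PRECONDITION & SPEC =====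
-- Pre_ excludes only association lists that cannot arise from A's Python arguments of type
-- dict[str, set[str]]: duplicate keys in target_pid_map or duplicate pids inside a target's pid
-- list (a dict has unique keys and a set has distinct elements); there the encoding is ambiguous.
def Pre_get_linked_nodes (source_node : String) (source_pid_map : List (String × List String)) (target_pid_map : List (String × List String)) : Prop :=
  (target_pid_map.map Prod.fst).Nodup ∧ ∀ p ∈ target_pid_map, p.2.Nodup
instance (source_node : String) (source_pid_map : List (String × List String)) (target_pid_map : List (String × List String)) : Decidable (Pre_get_linked_nodes source_node source_pid_map target_pid_map) := by unfold Pre_get_linked_nodes; infer_instance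

def pvWitness_get_linked_nodes : String × (List (String × List String)) × (List (String × List String)) :=
  ("a", [("a", ["p", "q"])], [("t", ["p"]), ("u", ["q", "r"]), ("v", ["z"])])

def Spec_get_linked_nodes (source_node : String) (source_pid_map : List (String × List String)) (target_pid_map : List (String × List String)) (out : List String) : Prop := out = get_linked_nodes_alt source_node source_pid_map target_pid_map
instance (source_node : String) (source_pid_map : List (String × List String)) (target_pid_map : List (String × List String)) (out : List String) : Decidable (Spec_get_linked_nodes source_node source_pid_map target_pid_map out) := by unfold Spec_get_linked_nodes; infer_instance

-- ===== CLAIM (what is proved, stated in full; the proofs are below) =====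
def Claim_equal_get_linked_nodes : Prop := ∀ (source_node : String) (source_pid_map : List (String × List String)) (target_pid_map : List (String × List String)), Dom_get_linked_nodes source_node source_pid_map target_pid_map → Pre_get_linked_nodes source_node source_pid_map target_pid_map → Spec_get_linked_nodes source_node source_pid_map target_pid_map (get_linked_nodes source_node source_pid_map target_pid_map)

-- ===== LEMMAS AND PROOFS =====

-- the counter loop of B: final count of a name = sum over source pids of its multiplicity in the index bucket
theorem pv_counts_getD (index : PySem.Dict String (List String)) (sp : List String)
    (d : PySem.Dict String Int) (n : String) :
    (sp.foldl (fun d pid => (index.getD pid []).foldl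
        (fun d node => d.insert node (d.getD node 0 + 1)) d) d).getD n 0
      = d.getD n 0 + (sp.map (fun pid => ((index.getD pid []).count n : Int))).sum := by
  induction sp generalizing d with
  | nil => simp
  | cons pid tl ih =>
    simp only [List.foldl_cons, List.map_cons, List.sum_cons]
    rw [ih, PySem.Dict.getD_foldl_insert_add_one]
    ring

-- one target entry's contribution to the flattened (pid, node) pair list
theorem pv_head_count (pl : List String) (nodename pid n : String) :
    ((((pl.map (fun q => (q, nodename))).filter (fun q => q.1 == pid)).map (fun x => x.2)).count n : Int)
      = if nodename = n then (pl.count pid : Int) else 0 := by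
  induction pl with
  | nil => simp
  | cons q tl ih =>
    by_cases hq : q = pid
    · subst hq
      by_cases hn : nodename = n
      · simp [hn] at ih ⊢
        exact_mod_cast ih
      · simp [hn, ih]
    · simp [hq, ih]

-- multiplicity of name n in the bucket of pid, expressed as a sum over target entries
theorem pv_count_flat (tm : List (String × List String)) (pid n : String) :
    ((((tm.flatMap (fun p => p.2.map (fun q => (q, p.1)))).filter (fun q => q.1 == pid)).map (fun x => x.2)).count n : Int)
      = (tm.map (fun p => if p.1 = n then (p.2.count pid : Int) else 0)).sum := by
  induction tm with
  | nil => simp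
  | cons p tl ih =>
    simp only [List.flatMap_cons, List.filter_append, List.map_append, List.count_append,
      List.map_cons, List.sum_cons]
    rw [Nat.cast_add, pv_head_count p.2 p.1 pid n, ih]

-- pull an entry-level condition out of the sum over source pids
theorem pv_sum_ite_comm (sp : List String) (c : Prop) [Decidable c] (f : String → Int) :
    (sp.map (fun pid => if c then f pid else 0)).sum
      = if c then (sp.map f).sum else 0 := by
  by_cases h : c <;> simp [h]

-- swap the two summations (over source pids and over target entries)
theorem pv_sum_swap (sp : List String) (tm : List (String × List String)) (n : String) :
    (sp.map (fun pid => (tm.map (fun p => if p.1 = n then (p.2.count pid : Int) else 0)).sum)).sum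
      = (tm.map (fun p => if p.1 = n then (sp.map (fun pid => (p.2.count pid : Int))).sum else 0)).sum := by
  induction tm with
  | nil => simp
  | cons p tl ih =>
    simp only [List.map_cons, List.sum_cons]
    rw [← ih, ← pv_sum_ite_comm sp (p.1 = n) (fun pid => (p.2.count pid : Int)),
      ← PySem.List.sum_map_add_int]

-- over a duplicate-free pid list, summed multiplicities are exactly A's intersection size
theorem pv_sum_count_eq_inter (sp pl : List String) (h : pl.Nodup) :
    (sp.map (fun pid => (pl.count pid : Int))).sum = ((PySem.Set.inter sp pl).length : Int) := by
  have hmap : (sp.map (fun pid => (pl.count pid : Int)))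
      = sp.map (fun pid => if pl.contains pid = true then 1 else 0) := by
    apply List.map_congr_left
    intro pid _
    by_cases hm : pid ∈ pl
    · simp [List.count_eq_one_of_mem h hm, hm]
    · simp [List.count_eq_zero_of_not_mem hm, hm]
  rw [hmap, PySem.List.sum_map_ite_one_zero, PySem.Set.inter]
  rw [List.countP_eq_length_filter]
  norm_cast

-- with unique target keys, the sum over target entries collapses to the entry itself
theorem pv_sum_single (tm : List (String × List String)) (hk : (tm.map Prod.fst).Nodup)
    (p : String × List String) (hp : p ∈ tm) (f : (String × List String) → Int) :
    (tm.map (fun q => if q.1 = p.1 then f q else 0)).sum = f p := by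
  induction tm with
  | nil => cases hp
  | cons q tl ih =>
    simp only [List.map_cons, List.sum_cons, List.nodup_cons] at hk ⊢
    rcases List.mem_cons.mp hp with h | h
    · subst h
      have : (tl.map (fun q => if q.1 = p.1 then f q else 0)).sum = 0 := by
        apply List.sum_eq_zero
        intro x hx
        rcases List.mem_map.mp hx with ⟨r, hr, hrx⟩
        have : r.1 ≠ p.1 := by
          intro he
          exact hk.1 (List.mem_map.mpr ⟨r, hr, he⟩)
        simpa [this] using hrx.symm
      simp [this]
    · have hne : q.1 ≠ p.1 := by
        intro he
        exact hk.1 (List.mem_map.mpr ⟨p, h, he.symm⟩)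
      simp [hne, ih hk.2 h]

-- the characterisation of B's counter: for any target entry (with Pre_), its count is A's overlap
theorem pv_counts_eq_overlap (sp : List String) (tm : List (String × List String))
    (hk : (tm.map Prod.fst).Nodup) (hv : ∀ p ∈ tm, p.2.Nodup)
    (p : String × List String) (hp : p ∈ tm) :
    ((sp.foldl (fun d pid =>
        (((tm.flatMap (fun p => p.2.map (fun pid => (pid, p.1)))).foldl
            (fun d q => d.modify q.1 [] (fun l => l ++ [q.2])) PySem.Dict.empty).getD pid []).foldl
          (fun d node => d.insert node (d.getD node 0 + 1)) d)
        (PySem.Dict.empty : PySem.Dict String Int)).getD p.1 0)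
      = ((PySem.Set.inter sp p.2).length : Int) := by
  rw [pv_counts_getD]
  simp only [PySem.Dict.getD_empty, PySem.Dict.getD_foldl_modify_append, List.nil_append, zero_add]
  have hbucket : (sp.map (fun pid =>
      ((((tm.flatMap (fun p => p.2.map (fun q => (q, p.1)))).filter (fun q => q.1 == pid)).map (fun x => x.2)).count p.1 : Int)))
      = sp.map (fun pid => (tm.map (fun q => if q.1 = p.1 then (q.2.count pid : Int) else 0)).sum) := by
    apply List.map_congr_left
    intro pid _
    exact pv_count_flat tm pid p.1
  rw [hbucket, pv_sum_swap, pv_sum_single tm hk p hp]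
  exact pv_sum_count_eq_inter sp p.2 (hv p hp)

-- ===== VERDICT (by name: the statement is the Claim_ definition above) =====
theorem get_linked_nodes_spec : Claim_equal_get_linked_nodes := by
  intro source_node source_pid_map target_pid_map _hdom hpre
  unfold Spec_get_linked_nodes get_linked_nodes get_linked_nodes_alt
  cases hsp : (PySem.Dict.mk source_pid_map).get? source_node with
  | none => rfl
  | some source_pids =>
    simp only [PySem.Dict.keys_mk, List.foldl_map]
    congr 2
    apply PySem.List.foldl_congr_mem'
    intro p hp acc
    rw [pv_counts_eq_overlap source_pids target_pid_map hpre.1 hpre.2 p hp]
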